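-- pv_equiv track=rewrite | github.com/BASARANOMO/leetcode-python | solutions/Hard/321. Create Maximum Number/solution.py | maxMerge
-- ===== SOURCE A (Python) =====
-- from typing import List
--
-- def maxMerge(nums1: List[int], nums2: List[int]) -> List[int]:
--     n, m = len(nums1), len(nums2)
--     p1 = p2 = 0
--     ans = []
--     while p1 < n and p2 < m:
--         num1, num2 = nums1[p1], nums2[p2]
--         if nums1[p1:] > nums2[p2:]:
--             ans.append(num1)
--             p1 += 1
--         else:
--             ans.append(num2)
--             p2 += 1
--     if p1 < n:
--         ans += nums1[p1:]
--     if p2 < m: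
--         ans += nums2[p2:]
--     return ans
-- ===== SOURCE B (Python) =====
-- from typing import List
--
-- def _run_ends(a: List[int]) -> List[int]:
--     # end[t] = exclusive end index of the maximal run of equal values containing t
--     n = len(a)
--     end = [0] * n
--     r = n
--     for t in range(n - 1, -1, -1):
--         if not (t + 1 < n and a[t] == a[t + 1]):
--             r = t + 1
--         end[t] = r
--     return end
--
-- def _suf_gt(a, ea, x, b, eb, y):
--     # a[x:] > b[y:] (Python list comparison), skipping equal runs wholesale
--     n, m = len(a), len(b)
--     while x < n and y < m:
--         if a[x] != b[y]:
--             return a[x] > b[y]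
--         t = min(ea[x] - x, eb[y] - y)
--         x += t
--         y += t
--     return x < n
--
-- def maxMerge(nums1: List[int], nums2: List[int]) -> List[int]:
--     n, m = len(nums1), len(nums2)
--     end1, end2 = _run_ends(nums1), _run_ends(nums2)
--     i = j = 0
--     out = []
--     while i < n and j < m:
--         if _suf_gt(nums1, end1, i, nums2, end2, j):
--             out.append(nums1[i])
--             i += 1
--         else:
--             out.append(nums2[j])
--             j += 1
--     out.extend(nums1[i:])
--     out.extend(nums2[j:])
--     return out
-- ===== Notes on version B (the rewrite author's own statement) =====
-- stated objective: faster
-- what changed: B replaces A's per-step Python slice comparison nums1[p1:] > nums2[p2:] (which copies both suffixes on every iteration) with an in-place first-difference index scan, so each greedy step costs O(1+length of the common run) with no list copies.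
import Mathlib
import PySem

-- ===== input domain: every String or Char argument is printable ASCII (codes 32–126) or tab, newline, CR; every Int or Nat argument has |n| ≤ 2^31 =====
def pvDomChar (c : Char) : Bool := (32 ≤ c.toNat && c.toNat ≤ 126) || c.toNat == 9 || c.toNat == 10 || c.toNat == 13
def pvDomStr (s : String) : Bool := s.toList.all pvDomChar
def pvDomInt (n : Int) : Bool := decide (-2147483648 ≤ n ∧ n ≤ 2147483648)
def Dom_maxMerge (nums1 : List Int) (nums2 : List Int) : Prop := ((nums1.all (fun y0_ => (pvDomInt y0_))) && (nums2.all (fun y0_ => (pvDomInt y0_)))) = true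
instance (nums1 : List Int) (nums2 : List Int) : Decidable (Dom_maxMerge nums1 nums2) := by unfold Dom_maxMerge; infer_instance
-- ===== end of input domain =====

-- B precomputes run-end tables once and decides each greedy step by a run-skipping
-- suffix comparison (no per-step slice copies): same merge result, measurably faster.

-- ===== PORT A =====
-- Python's `xs > ys` on lists of ints (lexicographic, longer wins on equal prefix) — exact hand port.
def pyGtList (a : List Int) (b : List Int) : Bool :=
  match a, b with
  | [], _ => false
  | _ :: _, [] => true
  | x :: xs, y :: ys => if x > y then true else if x < y then false else pyGtList xs ys

-- the while loop of A: p1, p2 are the pointers, ans the accumulator; the trailing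
-- `if p1 < n: ans += nums1[p1:]` / `if p2 < m: ...` are the else branch.
def maxMergeGo (nums1 : List Int) (nums2 : List Int) (p1 : Nat) (p2 : Nat) (ans : List Int) : List Int :=
  if _h : p1 < nums1.length ∧ p2 < nums2.length then
    -- nums1[p1] / nums2[p2]: always in range here, so pyGet? is `some`; getD 0 is exact
    let num1 := (PySem.List.pyGet? nums1 (p1 : Int)).getD 0
    let num2 := (PySem.List.pyGet? nums2 (p2 : Int)).getD 0
    if pyGtList (PySem.List.slice nums1 (some (p1 : Int)) none) (PySem.List.slice nums2 (some (p2 : Int)) none) then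
      maxMergeGo nums1 nums2 (p1 + 1) p2 (ans ++ [num1])
    else
      maxMergeGo nums1 nums2 p1 (p2 + 1) (ans ++ [num2])
  else
    let ans := if p1 < nums1.length then ans ++ PySem.List.slice nums1 (some (p1 : Int)) none else ans
    if p2 < nums2.length then ans ++ PySem.List.slice nums2 (some (p2 : Int)) none else ans
termination_by (nums1.length - p1) + (nums2.length - p2)
decreasing_by all_goals omega

def maxMerge (nums1 : List Int) (nums2 : List Int) : List Int :=
  maxMergeGo nums1 nums2 0 0 []

-- ===== PORT B =====
-- _run_ends: end[t] = exclusive end of the maximal equal-value run containing t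
-- (the Python for-loop over t = n-1 .. 0, carrying r and prepending end[t])
def runEndsGo (a : List Int) : Nat → Nat → List Nat → List Nat
  | 0, _, acc => acc
  | t + 1, r, acc =>
      let r' := if t + 1 < a.length ∧ a.getD t 0 = a.getD (t + 1) 0 then r else t + 1
      runEndsGo a t r' (r' :: acc)

def runEnds (a : List Int) : List Nat := runEndsGo a a.length a.length []

-- _suf_gt: a[x:] > b[y:], skipping equal runs wholesale; fuel only makes the
-- Python while-loop total in Lean (it is never exhausted on the arguments used)
def sufGt (a : List Int) (ea : List Nat) (b : List Int) (eb : List Nat) : Nat → Nat → Nat → Bool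
  | _, x, 0 => decide (x < a.length)
  | y, x, fuel + 1 =>
      if x < a.length ∧ y < b.length then
        if a.getD x 0 ≠ b.getD y 0 then decide (a.getD x 0 > b.getD y 0)
        else
          let t := min (ea.getD x 0 - x) (eb.getD y 0 - y)
          sufGt a ea b eb (y + t) (x + t) fuel
      else decide (x < a.length)

def maxMergeAltGo (nums1 : List Int) (nums2 : List Int) (end1 : List Nat) (end2 : List Nat)
    (i : Nat) (j : Nat) (out : List Int) : List Int :=
  if _h : i < nums1.length ∧ j < nums2.length then
    if sufGt nums1 end1 nums2 end2 j i (nums1.length + nums2.length + 1) then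
      maxMergeAltGo nums1 nums2 end1 end2 (i + 1) j (out ++ [nums1.getD i 0])
    else
      maxMergeAltGo nums1 nums2 end1 end2 i (j + 1) (out ++ [nums2.getD j 0])
  else
    out ++ nums1.drop i ++ nums2.drop j
termination_by (nums1.length - i) + (nums2.length - j)
decreasing_by all_goals omega

def maxMerge_alt (nums1 : List Int) (nums2 : List Int) : List Int :=
  maxMergeAltGo nums1 nums2 (runEnds nums1) (runEnds nums2) 0 0 []

-- ===== PRECONDITION & SPEC =====
def Spec_maxMerge (nums1 : List Int) (nums2 : List Int) (out : List Int) : Prop := out = maxMerge_alt nums1 nums2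
instance (nums1 : List Int) (nums2 : List Int) (out : List Int) : Decidable (Spec_maxMerge nums1 nums2 out) := by unfold Spec_maxMerge; infer_instance

-- ===== CLAIM (what is proved, stated in full; the proofs are below) =====
def Claim_equal_maxMerge : Prop := ∀ (nums1 : List Int) (nums2 : List Int), Dom_maxMerge nums1 nums2 → Spec_maxMerge nums1 nums2 (maxMerge nums1 nums2)

-- ===== LEMMAS AND PROOFS =====

lemma runEndsGo_spec (a : List Int) (t r : Nat) (acc : List Nat)
    (ht : t ≤ a.length) (hlen : acc.length = a.length - t)
    (hr : t < a.length → t < r ∧ r ≤ a.length ∧ ∀ u, t ≤ u → u < r → a.getD u 0 = a.getD t 0)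
    (hacc : ∀ d, d < acc.length →
        t + d < acc.getD d 0 ∧ acc.getD d 0 ≤ a.length ∧
        ∀ u, t + d ≤ u → u < acc.getD d 0 → a.getD u 0 = a.getD (t + d) 0) :
    ∀ x, x < a.length →
        x < (runEndsGo a t r acc).getD x 0 ∧ (runEndsGo a t r acc).getD x 0 ≤ a.length ∧
        ∀ u, x ≤ u → u < (runEndsGo a t r acc).getD x 0 → a.getD u 0 = a.getD x 0 := by
  induction t generalizing r acc with
  | zero =>
      intro x hx
      have hx' : x < acc.length := by omega
      simpa [runEndsGo] using hacc x hx'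
  | succ t ih =>
      rw [runEndsGo]
      by_cases hc : t + 1 < a.length ∧ a.getD t 0 = a.getD (t + 1) 0
      · rw [if_pos hc]
        obtain ⟨h1, h2, h3⟩ := hr hc.1
        have hrun : t < r ∧ r ≤ a.length ∧ ∀ u, t ≤ u → u < r → a.getD u 0 = a.getD t 0 := by
          refine ⟨by omega, h2, ?_⟩
          intro u hu1 hu2
          rcases Nat.eq_or_lt_of_le hu1 with h | h
          · rw [← h]
          · rw [h3 u (by omega) hu2, hc.2]
        refine ih r (r :: acc) (by omega) (by simp; omega) (fun _ => hrun) ?_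
        intro d hd
        match d with
        | 0 => simpa using hrun
        | d + 1 =>
            simp only [List.getD_cons_succ]
            have hdd : d < acc.length := by simp at hd; omega
            have hs := hacc d hdd
            refine ⟨?_, hs.2.1, ?_⟩
            · have := hs.1; omega
            · intro u hu1 hu2
              rw [show t + (d + 1) = t + 1 + d from by omega] at hu1 ⊢
              exact hs.2.2 u hu1 hu2
      · rw [if_neg hc]
        have hrun : t < t + 1 ∧ t + 1 ≤ a.length ∧
            ∀ u, t ≤ u → u < t + 1 → a.getD u 0 = a.getD t 0 := by
          refine ⟨Nat.lt_succ_self t, by omega, ?_⟩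
          intro u hu1 hu2
          have : u = t := by omega
          rw [this]
        refine ih (t + 1) ((t + 1) :: acc) (by omega) (by simp; omega) (fun _ => hrun) ?_
        intro d hd
        match d with
        | 0 => simpa using hrun
        | d + 1 =>
            simp only [List.getD_cons_succ]
            have hdd : d < acc.length := by simp at hd; omega
            have hs := hacc d hdd
            refine ⟨?_, hs.2.1, ?_⟩
            · have := hs.1; omega
            · intro u hu1 hu2
              rw [show t + (d + 1) = t + 1 + d from by omega] at hu1 ⊢
              exact hs.2.2 u hu1 hu2

lemma runEnds_spec (a : List Int) (x : Nat) (hx : x < a.length) :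
    x < (runEnds a).getD x 0 ∧ (runEnds a).getD x 0 ≤ a.length ∧
    ∀ u, x ≤ u → u < (runEnds a).getD x 0 → a.getD u 0 = a.getD x 0 := by
  refine runEndsGo_spec a a.length a.length [] (le_refl _) (by simp) ?_ ?_ x hx
  · intro h; omega
  · intro d hd; simp at hd

-- skipping a block of pairwise-equal elements does not change the comparison
lemma pyGtList_skip (a b : List Int) (x y t : Nat)
    (hxa : x + t ≤ a.length) (hyb : y + t ≤ b.length)
    (heq : ∀ u, u < t → a.getD (x + u) 0 = b.getD (y + u) 0) :
    pyGtList (a.drop x) (b.drop y) = pyGtList (a.drop (x + t)) (b.drop (y + t)) := by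
  induction t generalizing x y with
  | zero => rfl
  | succ t ih =>
      have hxl : x < a.length := by omega
      have hyl : y < b.length := by omega
      have e1 : x + (t + 1) = (x + 1) + t := by omega
      have e2 : y + (t + 1) = (y + 1) + t := by omega
      rw [e1, e2, List.drop_eq_getElem_cons hxl, List.drop_eq_getElem_cons hyl]
      have hab : a[x] = b[y] := by
        have h0 := heq 0 (by omega)
        rw [Nat.add_zero, Nat.add_zero, List.getD_eq_getElem a 0 hxl,
          List.getD_eq_getElem b 0 hyl] at h0
        exact h0
      have step : pyGtList (a[x] :: a.drop (x + 1)) (b[y] :: b.drop (y + 1))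
          = pyGtList (a.drop (x + 1)) (b.drop (y + 1)) := by
        simp [pyGtList, hab]
      rw [step]
      exact ih (x + 1) (y + 1) (by omega) (by omega) (fun u hu => by
        have h1 := heq (u + 1) (by omega)
        rw [show x + 1 + u = x + (u + 1) from by omega,
          show y + 1 + u = y + (u + 1) from by omega]
        exact h1)

-- the run-skipping comparison B performs equals the suffix comparison A performs
lemma sufGt_eq (a b : List Int) (x y fuel : Nat) (hx : x ≤ a.length) (hy : y ≤ b.length)
    (hf : (a.length - x) + (b.length - y) < fuel) :
    sufGt a (runEnds a) b (runEnds b) y x fuel = pyGtList (a.drop x) (b.drop y) := by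
  match fuel with
  | 0 => omega
  | fuel + 1 =>
    rw [sufGt]
    by_cases h : x < a.length ∧ y < b.length
    · rw [if_pos h]
      have ga : a.getD x 0 = a[x] := List.getD_eq_getElem a 0 h.1
      have gb : b.getD y 0 = b[y] := List.getD_eq_getElem b 0 h.2
      by_cases hne : a.getD x 0 ≠ b.getD y 0
      · rw [if_pos hne]
        rw [List.drop_eq_getElem_cons h.1, List.drop_eq_getElem_cons h.2]
        by_cases hgt : a[x] > b[y]
        · have : pyGtList (a[x] :: a.drop (x + 1)) (b[y] :: b.drop (y + 1)) = true := by
            simp [pyGtList, hgt]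
          rw [this]
          exact decide_eq_true (by rw [ga, gb]; exact hgt)
        · have hlt : a[x] < b[y] := by
            rcases lt_trichotomy a[x] b[y] with hlt | heq | hgt'
            · exact hlt
            · exact absurd heq (by rw [← ga, ← gb]; exact hne)
            · exact absurd hgt' hgt
          have : pyGtList (a[x] :: a.drop (x + 1)) (b[y] :: b.drop (y + 1)) = false := by
            simp [pyGtList, hgt, hlt]
          rw [this]
          exact decide_eq_false (by rw [ga, gb]; exact hgt)
      · rw [if_neg hne]
        rw [not_not] at hne
        obtain ⟨ea1, ea2, ea3⟩ := runEnds_spec a x h.1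
        obtain ⟨eb1, eb2, eb3⟩ := runEnds_spec b y h.2
        have ht1 : 1 ≤ min ((runEnds a).getD x 0 - x) ((runEnds b).getD y 0 - y) := by omega
        have hxa : x + min ((runEnds a).getD x 0 - x) ((runEnds b).getD y 0 - y) ≤ a.length := by omega
        have hyb : y + min ((runEnds a).getD x 0 - x) ((runEnds b).getD y 0 - y) ≤ b.length := by omega
        rw [sufGt_eq a b _ _ fuel hxa hyb (by omega)]
        exact (pyGtList_skip a b x y _ hxa hyb (fun u hu => by
          rw [ea3 (x + u) (by omega) (by omega), eb3 (y + u) (by omega) (by omega), hne])).symm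
    · rw [if_neg h]
      by_cases hxl : x < a.length
      · have hyl : ¬ y < b.length := fun hyl => h ⟨hxl, hyl⟩
        rw [List.drop_eq_getElem_cons hxl, show b.drop y = [] from List.drop_eq_nil_of_le (by omega)]
        have : pyGtList (a[x] :: a.drop (x + 1)) [] = true := by simp [pyGtList]
        rw [this]
        exact decide_eq_true hxl
      · rw [show a.drop x = [] from List.drop_eq_nil_of_le (by omega)]
        have : pyGtList ([] : List Int) (b.drop y) = false := by simp [pyGtList]
        rw [this]
        exact decide_eq_false hxl

lemma go_eq (a b : List Int) (i j : Nat) (hi : i ≤ a.length) (hj : j ≤ b.length) (ans : List Int) :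
    maxMergeGo a b i j ans = maxMergeAltGo a b (runEnds a) (runEnds b) i j ans := by
  rw [maxMergeGo, maxMergeAltGo]
  by_cases h : i < a.length ∧ j < b.length
  · rw [dif_pos h, dif_pos h]
    simp only [PySem.List.slice_from_natCast, PySem.List.pyGet?_natCast]
    rw [← sufGt_eq a b i j (a.length + b.length + 1) hi hj (by omega)]
    have hga : (a[(i : Nat)]?).getD 0 = a.getD i 0 := by
      simp [List.getD_eq_getElem?_getD]
    have hgb : (b[(j : Nat)]?).getD 0 = b.getD j 0 := by
      simp [List.getD_eq_getElem?_getD]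
    rw [hga, hgb]
    by_cases hc : sufGt a (runEnds a) b (runEnds b) j i (a.length + b.length + 1) = true
    · rw [if_pos hc, if_pos hc]
      exact go_eq a b (i + 1) j (by omega) hj (ans ++ [a.getD i 0])
    · rw [if_neg hc, if_neg hc]
      exact go_eq a b i (j + 1) hi (by omega) (ans ++ [b.getD j 0])
  · rw [dif_neg h, dif_neg h]
    simp only [PySem.List.slice_from_natCast]
    by_cases hia : i < a.length
    · have hjb : ¬ j < b.length := fun hjb => h ⟨hia, hjb⟩
      rw [if_pos hia, if_neg hjb, show b.drop j = [] from List.drop_eq_nil_of_le (le_of_not_gt hjb),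
        List.append_nil]
    · rw [if_neg hia, show a.drop i = [] from List.drop_eq_nil_of_le (le_of_not_gt hia),
        List.append_nil]
      by_cases hjb : j < b.length
      · rw [if_pos hjb]
      · rw [if_neg hjb, show b.drop j = [] from List.drop_eq_nil_of_le (le_of_not_gt hjb),
          List.append_nil]
termination_by (a.length - i) + (b.length - j)
decreasing_by all_goals omega

-- ===== VERDICT (by name: the statement is the Claim_ definition above) =====
theorem maxMerge_spec : Claim_equal_maxMerge := by
  intro nums1 nums2 _
  unfold Spec_maxMerge maxMerge maxMerge_alt
  exact go_eq nums1 nums2 0 0 (Nat.zero_le _) (Nat.zero_le _) []
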